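/-
  THE FRAME LAYER OF start_decoder's FLOOR SECTION (segments F1 … F7 and their children; stb_vorbis_fixed.c 3963 – 4036).

  Every cut point of the floor section asserts `FloorLoop u₀ g pc i A5 A v` (Vorbis/Spec/StartDecoderB.lean: `Frame` with its 19
  fields, `Mid g 5 5 6`, `cnt`, `i_le`, `FloorsUpTo`, `LflUpTo`) plus the clauses of the floor element under construction
  (`Floor4` / `Floor5` / `Floor6`). After EVERY call return and EVERY store the whole assertion has to be re-established for the new
  memory. The owner's file has the per-clause lemmas (`Mid.frame`, `FloorsUpTo.frame`, `LongestOK.of_eq`, `SDFrameConsts.frame` …);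
  this file puts them together ONCE, over a description of "what was written" that fits both kinds of change of the section:

      (a) a callee's footprint   get_bits (`Reader.winsBits f`), error (`[f+140, f+144)`), a check routine (nothing), the pushed
                                 return address and the callee's frame below `[R + 8]`;
      (b) a small store          into the floor element `g(i) = floor_config + 1596·i` (1, 2 or 4 bytes), or into the spill slots
                                 `[R+30H]`, `[R+38H]` and the frame objects `low`, `hi`, `p` of the own frame.

  WHEN: you are at a state `s` reached from a cut point `v` (with `h : FloorLoop u₀ g pc i A5 A v` and `hlt : i < floor_count`), you
  have `hsame : Mem.SameExcept ws v.mem s.mem` (by `u_same`, a LITERAL list of windows), `hun : ShadowUntouched v.mem s.mem` (by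
  `v_untouched`, BEFORE `hsame`), and `Bits` for the new memory (the reader's post `hpost.bits.bits`, or `Bits.frame_fields` /
  `Reader.store_off_obj` when `*f` was not written), and you need the assertion at `s`.
  HOW: show that every window of `ws` is a `Floor.Win g G lo hi` (`G = floorAt g v.mem i`; `[G+lo, G+hi)` the part of the element
  that was written; `lo = hi` when none was) and apply

      Floor.carry        FloorLoop at `s` with the new pc (all of `Frame`, `Mid`, `cnt`, `i_le`, `FloorsUpTo`, `LflUpTo`)
      Floor.carry_quiet  the same for a piece that calls no reader (own stores, check routines, `error`): windows `Floor.Quiet`, and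
                         `Bits` is derived (`Floor.bits_quiet`), not asked
      Floor.carry_done   the same WITHOUT `i < floor_count`, for stack-only windows (F2's exit to R1: `i = floor_count`); `Floor.geo_at`
      Floor.same_mem     FloorLoop at a state whose memory is that of `v` (a piece without a store): new pc and registers only
      Floor.fields_same  `floorAt`, `floor_count`, `codebook_count`, `floor_types[i]` read the same in the new memory
      Floor.elem_below / Floor.elem_above   the element below `G+lo` / from `G+hi` on reads the same (`Mem.EqOn`): feed the
                         owners' `…UpTo.of_eq` lemmas with `simp only [vacc, voff] ; exact he.u8 _ (by omega) (by omega) (by omega)`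
      Floor.floor4_carry (21H ≤ lo) / floor5_carry (152H ≤ lo, n ≤ 16) / floor6_carry (346H ≤ lo, hi ≤ 634H) / classes_carry /
      Floor.classes_row (a store into row `n` of a class table keeps `ClassesUpTo … n`: F4)
                         the element's own clauses when the written part lies above what they read; `Floor5.min16` cuts the class
                         counter of an entry assertion down to 16 (the assertions quantify it existentially)
      Floor.geo          the geometry as 19 arithmetic facts for `omega` (get it ONCE per proof, before the walk); `Geo.step`: the same
                         facts about the new memory
      Floor.site         a check site inside the element: `Site (Live …) (G + off) k` (then `Vorbis.Spec.check_site`)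
      Floor.reader_pre / Floor.error_pre / Floor.shadow_pre / Floor.reader_env / Floor.bits_push   the `pre_<addr>` goal of
                         `call get_bits` / `call error`
      Floor.rsp_slot / Floor.s32_word32 / Floor.s32_addr   for the walk: `addr (R + k) = e.rsp − (1480 − k)`; `r13d = max_class` and a
                         counter `addr j` in a signed 32-bit compare
      Floor.atERR        the error exit: FloorLoop at the epilogue's address with eax = 0 ⇒ `AtERR`
      Floor.obj_where    `*f` lies above the return-address slot or off the stack (= `P2.obj_where`; `LiveIn.where_` gives only `R ≤ f`)
  `Floor.WinT` additionally allows the word `floor_types[i]` of `*f` (segment F2 stores it); `Floor.carry_t` is `carry` for it.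
  NOT covered: the slots `[R+18H]` (`cnt`) and `[R+28H]` (`longest_floorlist`), which only F1's and F7's last arm write — there
  use the parts `Floor.frame_carry`, `Floor.mid_carry`, `Floor.floors_carry`, `Floor.old_kept`, `Floor.done_kept` one by one; an
  allocator call (F1: Vorbis/Spec/StartDecoderMid.lean).

  USAGE (the return of `call get_bits` at 0x1155cf; complete in farm/worked/start_decoder.F5a/Proof.lean; `hloop : FloorLoop … v`):
      obtain ⟨r8, rlo, rhi, ra, flo, fhi, fstack, farena, flog, fc1, fc64, ilt, gdef, blo, bhi, btext, bstack, bdata, blog⟩ := Floor.geo hloop hlt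
      … u_walk … ; v_after_call w_rsp_1155cf w_mem_1155cf ; simp only [w_rdi_1155cf] at w_same
      have hun : ShadowUntouched v.mem s_1155cfr.mem := Mem.EqOn.trans hun0 hpost.untouched
      have hsame : Mem.SameExcept [⟨R - 408, R⟩, ⟨f + 48, f + 56⟩, ⟨f + 84, f + 96⟩, ⟨f + 136, f + 144⟩, ⟨f + 1484, f + 1749⟩,
          ⟨f + 1752, f + 1784⟩] v.mem s_1155cfr.mem := by u_same
      have hws : ∀ w, w ∈ [ … the same list … ] → Floor.Win g (floorAt g v.mem i) 1596 1596 w := by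
        intro w hw ; simp only [List.mem_cons, List.mem_nil_iff, or_false] at hw
        rcases hw with rfl | rfl | rfl | rfl | rfl | rfl <;> unfold Floor.Win <;> simp only [] <;> omega
      have hloop' := Floor.carry hloop hlt (Nat.le_refl _) w_rip hrsp hrbp w_inv w_eq hsame hws hun hpost.bits.bits
      have hcur' := Floor.floor5_carry (Floor.geo hloop hlt) hcur hn (by omega) (Nat.le_refl _) (Nat.le_refl _) hsame hws
-/
import Vorbis.Spec.StartDecoderB
import Vorbis.Spec.StartDecoder2
import Vorbis.Spec.Reader
import Vorbis.LabelsAt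

namespace Vorbis.Spec.StartDecoder
open X86 X86.User Asan

namespace Floor

variable {u₀ : State} {g : Ghost} {pc pc' : Word} {i : Nat} {A5 : Arena} {A : Arena × List Obj} {v s : State}
  {mem mem' : Mem} {ws : List Span} {G lo hi : Nat}

/-! ### Where things are -/

/-- **Where `*f` is, relative to start_decoder's own stack frame**: above the return-address slot (an object of a CALLER's protected
frame: `Frame.callers`) or off the stack region (an object of `A.2`: `ShadowInv.off`). So no window of `*f` meets the own frame
`[RA − 1888, RA + 8)`: the spill slots, the compiler constants `[R+8, R+28H)`, the saved registers. (`LiveIn.where_` alone gives only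
`R ≤ f`.) The same fact as `P2.obj_where` (part 1) and `C4.obj_above` (part C). -/
theorem obj_where (hf : Frame u₀ g pc A v) (hh : g.Hand A) :
    g.RA + 8 ≤ g.f ∨ g.f + 1808 ≤ 0x700000 ∨ 0x800000 ≤ g.f :=
  P2.obj_where hf hh

/-- **The geometry of the floor section as arithmetic** (for `omega`): the steady stack pointer `R`, the decoder object `f` (off the
function's own frame, outside the arena, off the global `log2_4`), the floor block `[cfg, cfg + 1596·fc)` (inside the arena, off
the stack, off `log2_4`) and the element `G = cfg + 1596·i`. -/
structure Geo (g : Ghost) (A : Arena × List Obj) (mem : Mem) (i : Nat) : Prop where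
  /-- the steady stack pointer is 8-aligned -/
  r8 : g.R % 8 = 0
  /-- 408 bytes of room below it for the callees -/
  rlo : 0x700000 + 408 ≤ g.R
  /-- the own frame ends inside the stack region -/
  rhi : g.R + 1488 ≤ 0x800000
  /-- the return-address slot -/
  ra : g.R + 1480 = g.RA
  /-- `*f` is above the text -/
  flo : 0x119d40 ≤ g.f
  /-- `*f` ends below the shadow -/
  fhi : g.f + 1808 ≤ 0xC00000
  /-- `*f` is off the own frame (`obj_where`) -/
  fstack : g.R + 1488 ≤ g.f ∨ g.f + 1808 ≤ 0x700000 ∨ 0x800000 ≤ g.f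
  /-- `*f` is outside the arena (`HandOK.objOut`) -/
  farena : g.f + 1808 ≤ A.1.B ∨ A.1.B + A.1.L ≤ g.f
  /-- `*f` is apart from the global `log2_4` -/
  flog : g.f + 1808 ≤ 0x120640 ∨ 0x120650 ≤ g.f
  /-- FL1 -/
  fc1 : 1 ≤ stb_vorbis.floor_count mem g.f
  /-- FL1 -/
  fc64 : stb_vorbis.floor_count mem g.f ≤ 64
  /-- the element under construction is one of the block -/
  ilt : (i : Int) < stb_vorbis.floor_count mem g.f
  /-- the element's address -/
  gdef : floorAt g mem i = stb_vorbis.floor_config mem g.f + 1596 * i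
  /-- the floor block is inside the arena -/
  blo : A.1.B ≤ stb_vorbis.floor_config mem g.f
  /-- the floor block is inside the arena -/
  bhi : stb_vorbis.floor_config mem g.f + 1596 * (stb_vorbis.floor_count mem g.f).toNat ≤ A.1.B + A.1.L
  /-- the arena is above the text -/
  btext : 0x119d40 ≤ A.1.B
  /-- the floor block is off the stack region -/
  bstack : stb_vorbis.floor_config mem g.f + 1596 * (stb_vorbis.floor_count mem g.f).toNat ≤ 0x700000 ∨
    0x800000 ≤ stb_vorbis.floor_config mem g.f
  /-- the floor block ends below the shadow -/
  bdata : stb_vorbis.floor_config mem g.f + 1596 * (stb_vorbis.floor_count mem g.f).toNat ≤ 0xC00000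
  /-- the floor block is apart from the global `log2_4` -/
  blog : stb_vorbis.floor_config mem g.f + 1596 * (stb_vorbis.floor_count mem g.f).toNat ≤ 0x120640 ∨
    0x120650 ≤ stb_vorbis.floor_config mem g.f

/-- **The geometry from the loop assertion, for ANY element `i0 < floor_count`** (the loop counter `i` of the assertion plays no
part: at the loop's exit `i = floor_count` and `geo_at h 0` still gives the facts about `R`, `f` and the floor block). -/
theorem geo_at {i0 : Nat} (h : FloorLoop u₀ g pc i A5 A v) (hlt : (i0 : Int) < stb_vorbis.floor_count v.mem g.f) :
    Geo g A v.mem i0 := by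
  have hf := h.frame
  have hm := h.mid
  obtain ⟨hr1, hr8⟩ := hf.r_eq
  obtain ⟨ha1, ha2, ha3⟩ := hf.ra
  simp only [steady, depth] at hr1 ha2
  have hw := obj_where hf h.hand
  have hobj : LiveIn A.2 g.frames' g.f Off.sizeof.stb_vorbis := h.hand.obj.mono (P2.callers_live g A.2)
  obtain ⟨hw1, hw2, _⟩ := hobj.where_ hf.shadow hf.offText (by decide)
  simp only [Off.sizeof.stb_vorbis] at hw2
  have hout := h.hand.objOut
  simp only [Off.sizeof.stb_vorbis] at hout
  have hblk : Since A5 A.1 (floorBlock v.mem g.f) := h.floors.FL2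
  have hA := hm.arena
  obtain ⟨hin1, hin2⟩ := arena_inside hA hblk.blk
  have hoff := hA.blk_off_stack hblk.blk
  have hfl1 := h.floors.FL1
  have hok := hm.env.ok
  have hBf : g.Blk A (floorBlock v.mem g.f) := runBlk_setup hblk.blk
  have hins := hok.inside _ hBf
  have hBo : g.Blk A (objBlock g.f) := hm.bits.OB1
  have hBl : g.Blk A ⟨0x120640, 16⟩ := by
    apply runBlk_extra
    simp only [fixedBlocks, globalBlocks, List.mem_cons, List.mem_nil_iff, or_false, true_or, or_true]
  have hd1 : (objBlock g.f).disjoint ⟨0x120640, 16⟩ := by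
    apply hok.disjoint hBo hBl
    intro e
    have := congrArg Block.size e
    simp only [objBlock, Off.sizeof.stb_vorbis] at this
    omega
  have hd2 : (floorBlock v.mem g.f).disjoint ⟨0x120640, 16⟩ := by
    apply hok.disjoint_of_base hBf hBl
    intro e
    have ho := h.hand.outside ⟨0x120640, 16⟩ (by
      simp only [fixedBlocks, globalBlocks, List.mem_cons, List.mem_nil_iff, or_false, true_or, or_true])
    have h1' := hin1
    have h2' := hin2
    simp only [floorBlock, voff] at e h1' h2'
    simp only [] at ho
    omega
  have htext := h.hand.arenaText
  have etext : L.textHi = 0x119d40 := rfl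
  simp only [floorBlock, voff] at hin1 hin2 hoff hins
  simp only [vblock, floorBlock, voff, Off.sizeof.stb_vorbis] at hd1 hd2
  refine ⟨hr8, by omega, by omega, hr1, hw1, hw2, by omega, hout, by omega, hfl1.1, hfl1.2, hlt, ?_, hin1, hin2,
    by omega, hoff, hins.2, by omega⟩
  simp only [floorAt, stb_vorbis.floor_config_at, voff]

/-- **The geometry from the loop assertion** and `i < floor_count` (every body from F3 on has it: `Floor4.lt`, `BodyF3.lt`). -/
theorem geo (h : FloorLoop u₀ g pc i A5 A v) (hlt : (i : Int) < stb_vorbis.floor_count v.mem g.f) : Geo g A v.mem i :=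
  geo_at h hlt

/-! ### What a piece of the section may write -/

/-- **A window that a piece of F3 … F7 may write**, relative to the state it starts from (`G` = the element under construction,
`[G + lo, G + hi)` the part of it that the piece writes — `lo = hi` for a piece that writes none of it):
the stack below `[R + 8]` (the callees' frames, the pushed return addresses, `[R, R+8)`); the own frame from `[R+30H]` to the saved
registers (the spills `[R+30H]`, `[R+38H]`, the frame objects `low` `[R+80H]`, `hi` `[R+90H]`, `p` `[R+120H, R+508H)`); the bit
reader's five windows of `*f` (`Reader.winsBits f`; `error`'s `[f+140, f+144)` lies inside the third); the element's part. -/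
def Win (g : Ghost) (G lo hi : Nat) (w : Span) : Prop :=
  (g.RA - 1888 ≤ w.lo ∧ w.hi ≤ g.R + 8) ∨ (g.R + 0x30 ≤ w.lo ∧ w.hi ≤ g.R + 0x598) ∨
  (g.f + 48 ≤ w.lo ∧ w.hi ≤ g.f + 56) ∨ (g.f + 84 ≤ w.lo ∧ w.hi ≤ g.f + 96) ∨ (g.f + 136 ≤ w.lo ∧ w.hi ≤ g.f + 144) ∨
  (g.f + 1484 ≤ w.lo ∧ w.hi ≤ g.f + 1749) ∨ (g.f + 1752 ≤ w.lo ∧ w.hi ≤ g.f + 1784) ∨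
  (G + lo ≤ w.lo ∧ w.hi ≤ G + hi)

/-- **`Win`, or the word `floor_types[i]` of `*f`** (`[f + 180 + 2i, f + 182 + 2i)`: segment F2 stores it, 0x1152a7). -/
def WinT (g : Ghost) (i G lo hi : Nat) (w : Span) : Prop :=
  Win g G lo hi w ∨ (g.f + 180 + 2 * i ≤ w.lo ∧ w.hi ≤ g.f + 182 + 2 * i)

/-- A `Win` is a `WinT`. -/
theorem Win.winT {w : Span} (h : Win g G lo hi w) : WinT g i G lo hi w :=
  Or.inl h

/-- A larger part of the element. -/
theorem Win.widen {w : Span} {lo' hi' : Nat} (h : Win g G lo hi w) (h1 : lo' ≤ lo) (h2 : hi ≤ hi') : Win g G lo' hi' w := by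
  unfold Win at h ⊢
  omega

/-- **A range that meets no allowed window reads the same**: `Mem.SameExcept.eqOn` for windows described by a predicate. -/
theorem eqOn_off {P : Span → Prop} (hs : Mem.SameExcept ws mem mem') (hw : ∀ w, w ∈ ws → P w) (a b : Nat)
    (hd : ∀ w, P w → b ≤ w.lo ∨ w.hi ≤ a) : Mem.EqOn a b mem mem' := by
  apply hs.eqOn
  intro w hw'
  exact hd w (hw w hw')

/-! ### The fields of `*f` and the element's address -/

/-- **The header fields the floor clauses read are the same in the new memory**: `floor_count`, `floor_config` (so the element does
not move), `codebook_count`, and every `floor_types[i']` but the one of the element under construction. -/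
theorem hdr_same (geo : Geo g A mem i) (hs : Mem.SameExcept ws mem mem')
    (hw : ∀ w, w ∈ ws → WinT g i (floorAt g mem i) lo hi w) (hhi : hi ≤ 1596) :
    stb_vorbis.floor_count mem' g.f = stb_vorbis.floor_count mem g.f ∧
    stb_vorbis.floor_config mem' g.f = stb_vorbis.floor_config mem g.f ∧
    stb_vorbis.codebook_count mem' g.f = stb_vorbis.codebook_count mem g.f ∧
    (∀ i' : Nat, i' < 64 → i' ≠ i → stb_vorbis.floor_types mem' g.f i' = stb_vorbis.floor_types mem g.f i') ∧
    floorAt g mem' i = floorAt g mem i := by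
  obtain ⟨r8, rlo, rhi, ra, flo, fhi, fstack, farena, flog, fc1, fc64, ilt, gdef, blo, bhi, btext, bstack, bdata, blog⟩ := geo
  have Fa : Mem.EqOn (g.f + 144) (g.f + 180 + 2 * i) mem mem' := by
    apply eqOn_off hs hw
    intro w hc
    unfold WinT Win at hc
    omega
  have Fb : Mem.EqOn (g.f + 182 + 2 * i) (g.f + 1484) mem mem' := by
    apply eqOn_off hs hw
    intro w hc
    unfold WinT Win at hc
    omega
  have ecount : stb_vorbis.floor_count mem' g.f = stb_vorbis.floor_count mem g.f := by
    simp only [vacc, voff]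
    exact Fa.i32 _ (by omega) (by omega) (by omega)
  have ecfg : stb_vorbis.floor_config mem' g.f = stb_vorbis.floor_config mem g.f := by
    simp only [vacc, voff]
    exact Fb.u64 _ (by omega) (by omega) (by omega)
  have ecc : stb_vorbis.codebook_count mem' g.f = stb_vorbis.codebook_count mem g.f := by
    simp only [vacc, voff]
    exact Fa.i32 _ (by omega) (by omega) (by omega)
  refine ⟨ecount, ecfg, ecc, ?_, ?_⟩
  · intro i' hi' hne
    simp only [vacc, voff]
    rcases Nat.lt_or_gt_of_ne hne with hlt' | hgt'
    · exact Fa.u16 _ (by omega) (by omega) (by omega)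
    · exact Fb.u16 _ (by omega) (by omega) (by omega)
  · simp only [floorAt, stb_vorbis.floor_config_at]
    rw [ecfg]

/-- **`floor_types[i]` too**, when the word was not written (`Win`, not `WinT`). -/
theorem types_same (geo : Geo g A mem i) (hs : Mem.SameExcept ws mem mem')
    (hw : ∀ w, w ∈ ws → Win g (floorAt g mem i) lo hi w) (hhi : hi ≤ 1596) :
    stb_vorbis.floor_types mem' g.f i = stb_vorbis.floor_types mem g.f i := by
  obtain ⟨r8, rlo, rhi, ra, flo, fhi, fstack, farena, flog, fc1, fc64, ilt, gdef, blo, bhi, btext, bstack, bdata, blog⟩ := geo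
  have Fa : Mem.EqOn (g.f + 144) (g.f + 1484) mem mem' := by
    apply eqOn_off hs hw
    intro w hc
    unfold Win at hc
    omega
  simp only [vacc, voff]
  exact Fa.u16 _ (by omega) (by omega) (by omega)

/-- **The element below the written part reads the same.** -/
theorem elem_below (geo : Geo g A mem i) (hs : Mem.SameExcept ws mem mem')
    (hw : ∀ w, w ∈ ws → WinT g i (floorAt g mem i) lo hi w) (hlh : lo ≤ hi) (hhi : hi ≤ 1596) :
    Mem.EqOn (floorAt g mem i) (floorAt g mem i + lo) mem mem' := by
  obtain ⟨r8, rlo, rhi, ra, flo, fhi, fstack, farena, flog, fc1, fc64, ilt, gdef, blo, bhi, btext, bstack, bdata, blog⟩ := geo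
  apply eqOn_off hs hw
  intro w hc
  unfold WinT Win at hc
  omega

/-- **The element from the end of the written part on reads the same.** -/
theorem elem_above (geo : Geo g A mem i) (hs : Mem.SameExcept ws mem mem')
    (hw : ∀ w, w ∈ ws → WinT g i (floorAt g mem i) lo hi w) (hlh : lo ≤ hi) (hhi : hi ≤ 1596) :
    Mem.EqOn (floorAt g mem i + hi) (floorAt g mem i + 1596) mem mem' := by
  obtain ⟨r8, rlo, rhi, ra, flo, fhi, fstack, farena, flog, fc1, fc64, ilt, gdef, blo, bhi, btext, bstack, bdata, blog⟩ := geo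
  apply eqOn_off hs hw
  intro w hc
  unfold WinT Win at hc
  omega

/-! ### The parts of the loop assertion over a change of the memory -/

/-- An address of the function's stack `[RA − 1888, RA)` lies in the first window of the function's footprint. -/
theorem fp_stack (g : Ghost) (a : Nat) (k1 : g.RA - 1888 ≤ a) (k2 : a < g.RA) :
    ∃ w' ∈ footprint g, w'.lo ≤ a ∧ a < w'.hi := by
  have m1 : (⟨g.RA - depth, g.RA⟩ : Span) ∈ footprint g := List.mem_cons_self
  exact ⟨_, m1, by simp only [depth]; omega, by simp only []; omega⟩

/-- An address of `*f` lies in the second window of the function's footprint. -/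
theorem fp_obj (g : Ghost) (a : Nat) (k1 : g.f ≤ a) (k2 : a < g.f + 1808) :
    ∃ w' ∈ footprint g, w'.lo ≤ a ∧ a < w'.hi := by
  have m2 : (objBlock g.f).span ∈ footprint g := List.mem_cons_of_mem _ List.mem_cons_self
  exact ⟨_, m2, by simp only [vblock]; omega, by simp only [vblock, Off.sizeof.stb_vorbis]; omega⟩

/-- An address of the arena lies in the fourth window of the function's footprint. -/
theorem fp_arena (g : Ghost) (a : Nat) (k1 : g.A0.1.B ≤ a) (k2 : a < g.A0.1.B + g.A0.1.L) :
    ∃ w' ∈ footprint g, w'.lo ≤ a ∧ a < w'.hi := by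
  have m3 : (⟨g.A0.1.B, g.A0.1.B + g.A0.1.L⟩ : Span) ∈ footprint g :=
    List.mem_cons_of_mem _ (List.mem_cons_of_mem _ (List.mem_cons_of_mem _ List.mem_cons_self))
  exact ⟨_, m3, by simp only []; omega, by simp only []; omega⟩

/-- **The common part `Frame` over the stores of a piece** (all 19 fields): the new state has the steady stack pointer; its program
counter, the code span and DF / MXCSR come from the walk. (`P2.frame_carry_win` of part 1 has no arm for a heap block.) -/
theorem frame_carry (hf : Frame u₀ g pc A v) (geo : Geo g A v.mem i) (hrip : s.rip = pc') (hrsp : s.reg .rsp = addr g.R)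
    (hinv : abiInv s) (hcode : CodeOK u₀ s.mem) (hs : Mem.SameExcept ws v.mem s.mem)
    (hw : ∀ w, w ∈ ws → WinT g i (floorAt g v.mem i) lo hi w) (hhi : hi ≤ 1596)
    (hun : ShadowUntouched v.mem s.mem) : Frame u₀ g pc' A s := by
  obtain ⟨r8, rlo, rhi, ra, flo, fhi, fstack, farena, flog, fc1, fc64, ilt, gdef, blo, bhi, btext, bstack, bdata, blog⟩ := geo
  have EA : Mem.EqOn (g.R + 8) (g.R + 0x30) v.mem s.mem := by
    apply eqOn_off hs hw
    intro w hc
    unfold WinT Win at hc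
    omega
  have EB : Mem.EqOn (g.R + 0x598) (g.R + 0x5d0) v.mem s.mem := by
    apply eqOn_off hs hw
    intro w hc
    unfold WinT Win at hc
    omega
  have EL : Mem.EqOn 0x120640 0x120650 v.mem s.mem := by
    apply eqOn_off hs hw
    intro w hc
    unfold WinT Win at hc
    omega
  refine
    { entry := hf.entry
      rip := hrip
      rsp := hrsp
      shadowIdx := by rw [EA.u64 _ (by omega) (by omega) (by omega)]; exact hf.shadowIdx
      saved_rbx := by rw [EB.u64 _ (by omega) (by omega) (by omega)]; exact hf.saved_rbx
      saved_rbp := by rw [EB.u64 _ (by omega) (by omega) (by omega)]; exact hf.saved_rbp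
      saved_r12 := by rw [EB.u64 _ (by omega) (by omega) (by omega)]; exact hf.saved_r12
      saved_r13 := by rw [EB.u64 _ (by omega) (by omega) (by omega)]; exact hf.saved_r13
      saved_r14 := by rw [EB.u64 _ (by omega) (by omega) (by omega)]; exact hf.saved_r14
      saved_r15 := by rw [EB.u64 _ (by omega) (by omega) (by omega)]; exact hf.saved_r15
      saved_ra := by rw [EB.u64 _ (by omega) (by omega) (by omega)]; exact hf.saved_ra
      code := hcode
      inv := hinv
      shadow := hf.shadow.untouched hun
      offText := hf.offText
      ext := hf.ext
      callers := hf.callers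
      sh7 := ?_
      same := ?_ }
  · -- SH7: the global `log2_4` was not written
    intro k hk'
    have e : (UInt64.ofNat (Vorbis.Globals.log2_4.beg + k) : Word) = addr (0x120640 + k) := rfl
    rw [e, EL.readLE_addr _ 1 (by omega) (by omega) (by omega)]
    have h7 := hf.sh7 k hk'
    rw [e] at h7
    exact h7
  · -- the function's footprint: the stack, `*f`, the arena
    apply hf.same.step_same hs
    intro w hw' a h1 h2
    have hB := hf.ext.B
    have hL := hf.ext.L
    have hc := hw w hw'
    unfold WinT Win at hc
    rcases hc with (c | c | c | c | c | c | c | c) | c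
    · exact fp_stack g a (by omega) (by omega)
    · exact fp_stack g a (by omega) (by omega)
    · exact fp_obj g a (by omega) (by omega)
    · exact fp_obj g a (by omega) (by omega)
    · exact fp_obj g a (by omega) (by omega)
    · exact fp_obj g a (by omega) (by omega)
    · exact fp_obj g a (by omega) (by omega)
    · exact fp_arena g a (by omega) (by omega)
    · exact fp_obj g a (by omega) (by omega)

/-- **Every block of the snapshot `A5` is kept** (the floor block is younger: `Since A5 A.1`; `arena_disjoint`). -/
theorem old_kept (geo : Geo g A mem i) (hm : Mid g 5 5 6 A5 A mem) (hfl : FloorsUpTo (Since A5 A.1) mem g.f i)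
    (hs : Mem.SameExcept ws mem mem') (hw : ∀ w, w ∈ ws → WinT g i (floorAt g mem i) lo hi w) (hhi : hi ≤ 1596) :
    ∀ B, A5.Blk B → B.Kept mem mem' := by
  obtain ⟨r8, rlo, rhi, ra, flo, fhi, fstack, farena, flog, fc1, fc64, ilt, gdef, blo, bhi, btext, bstack, bdata, blog⟩ := geo
  have hA := hm.arena
  have hblk : Since A5 A.1 (floorBlock mem g.f) := hfl.FL2
  intro B hB
  have hBA : A.1.Blk B := hB.mono hm.extc
  obtain ⟨i1, i2⟩ := arena_inside hA hBA
  have hoff := hA.blk_off_stack hBA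
  have hd := hA.old_disjoint_since hm.extc hB hblk
  simp only [vblock, floorBlock, voff] at hd
  apply Block.Kept.of_sameExcept hs
  · intro w hw'
    have hc := hw w hw'
    unfold WinT Win at hc
    omega
  · exact hA.blkOK.no_wrap hBA

/-- **The finished floor elements are kept.** -/
theorem done_kept (geo : Geo g A mem i) (hs : Mem.SameExcept ws mem mem')
    (hw : ∀ w, w ∈ ws → WinT g i (floorAt g mem i) lo hi w) (hhi : hi ≤ 1596) :
    ∀ i' : Nat, i' < i → (Block.mk (stb_vorbis.floor_config_at mem g.f i') Off.sizeof.Floor).Kept mem mem' := by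
  obtain ⟨r8, rlo, rhi, ra, flo, fhi, fstack, farena, flog, fc1, fc64, ilt, gdef, blo, bhi, btext, bstack, bdata, blog⟩ := geo
  intro i' hi'
  apply Block.Kept.of_sameExcept hs
  · intro w hw'
    have hc := hw w hw'
    unfold WinT Win at hc
    simp only [stb_vorbis.floor_config_at, voff]
    omega
  · simp only [stb_vorbis.floor_config_at, voff]
    omega

/-- **The point `Mid g 5 5 6` over the stores of a piece** (`Mid.frame` with its seven premises from the windows). -/
theorem mid_carry (geo : Geo g A mem i) (hm : Mid g 5 5 6 A5 A mem) (hfl : FloorsUpTo (Since A5 A.1) mem g.f i)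
    (hs : Mem.SameExcept ws mem mem') (hw : ∀ w, w ∈ ws → WinT g i (floorAt g mem i) lo hi w) (hhi : hi ≤ 1596)
    (hun : ShadowUntouched mem mem') (hbits : Bits (g.Blk A) g.len mem' g.f) : Mid g 5 5 6 A5 A mem' := by
  have hk := old_kept geo hm hfl hs hw hhi
  obtain ⟨r8, rlo, rhi, ra, flo, fhi, fstack, farena, flog, fc1, fc64, ilt, gdef, blo, bhi, btext, bstack, bdata, blog⟩ := geo
  have EA : Mem.EqOn (g.R + 8) (g.R + 0x30) mem mem' := by
    apply eqOn_off hs hw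
    intro w hc
    unfold WinT Win at hc
    omega
  have F1 : Mem.EqOn g.f (g.f + 48) mem mem' := by
    apply eqOn_off hs hw
    intro w hc
    unfold WinT Win at hc
    omega
  have F2 : Mem.EqOn (g.f + 96) (g.f + 136) mem mem' := by
    apply eqOn_off hs hw
    intro w hc
    unfold WinT Win at hc
    omega
  have F3a : Mem.EqOn (g.f + 144) (g.f + 176) mem mem' := by
    apply eqOn_off hs hw
    intro w hc
    unfold WinT Win at hc
    omega
  have F3b : Mem.EqOn (g.f + 320) (g.f + 1484) mem mem' := by
    apply eqOn_off hs hw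
    intro w hc
    unfold WinT Win at hc
    omega
  have F4 : Mem.EqOn (g.f + 1749) (g.f + 1750) mem mem' := by
    apply eqOn_off hs hw
    intro w hc
    unfold WinT Win at hc
    omega
  have F5 : Mem.EqOn (g.f + 1784) (g.f + 1808) mem mem' := by
    apply eqOn_off hs hw
    intro w hc
    unfold WinT Win at hc
    omega
  have hf64 : g.f + Off.sizeof.stb_vorbis ≤ 2 ^ 64 := by
    simp only [Off.sizeof.stb_vorbis]
    omega
  have ewins : Mid.winsAt 5 6 = [(0, 8), (24, 48), (152, 176), (320, 1480), (1749, 1750), (1784, 1788)] := by rfl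
  have he : ObjEq (Mid.winsAt 5 6) mem g.f mem' g.f := by
    rw [ewins]
    apply ObjEq.of_eqOn
    · intro w hw'
      simp only [List.mem_cons, List.mem_nil_iff, or_false] at hw'
      rcases hw' with rfl | rfl | rfl | rfl | rfl | rfl
      all_goals simp only []
      all_goals omega
    · intro w hw'
      simp only [List.mem_cons, List.mem_nil_iff, or_false] at hw'
      rcases hw' with rfl | rfl | rfl | rfl | rfl | rfl
      · exact F1.mono (by simp only []; omega) (by simp only []; omega)
      · exact F1.mono (by simp only []; omega) (by simp only []; omega)
      · exact F3a.mono (by simp only []; omega) (by simp only []; omega)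
      · exact F3b.mono (by simp only []; omega) (by simp only []; omega)
      · exact F4.mono (by simp only []; omega) (by simp only []; omega)
      · exact F5.mono (by simp only []; omega) (by simp only []; omega)
  apply hm.frame he hk
  · exact hm.consts.frame (EA.mono (Nat.le_refl _) (by omega)) (by omega)
  · intro h6 _
    exact absurd h6 (by decide)
  · exact hun
  · apply hm.arena.frame hf64
    exact F2.mono (by simp only [voff]; omega) (by simp only [voff]; omega)
  · exact hbits

/-- **The loop's own clauses over the stores of a piece**: `FloorsUpTo` (FL1, FL2, the finished floors), `LflUpTo` (the slot
`[R+28H]`), `cnt` (the slot `[R+18H]`). -/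
theorem floors_carry (geo : Geo g A mem i) (hfl : FloorsUpTo (Since A5 A.1) mem g.f i) (hl : LflUpTo g mem i)
    (hcnt : slot g mem 0x18 = i) (hs : Mem.SameExcept ws mem mem')
    (hw : ∀ w, w ∈ ws → WinT g i (floorAt g mem i) lo hi w) (hhi : hi ≤ 1596) :
    FloorsUpTo (Since A5 A.1) mem' g.f i ∧ LflUpTo g mem' i ∧ slot g mem' 0x18 = i := by
  obtain ⟨ecount, ecfg, ecc, eft, _⟩ := hdr_same geo hs hw hhi
  have hkept := done_kept geo hs hw hhi
  obtain ⟨r8, rlo, rhi, ra, flo, fhi, fstack, farena, flog, fc1, fc64, ilt, gdef, blo, bhi, btext, bstack, bdata, blog⟩ := geo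
  have EA : Mem.EqOn (g.R + 8) (g.R + 0x30) mem mem' := by
    apply eqOn_off hs hw
    intro w hc
    unfold WinT Win at hc
    omega
  have eslot : mem'.i32 (g.R + 0x28) = mem.i32 (g.R + 0x28) := EA.i32 _ (by omega) (by omega) (by omega)
  refine ⟨?_, ?_, ?_⟩
  · apply hfl.frame ecount ecfg ecc
    · intro i' hi'
      exact eft i' (by omega) (by omega)
    · exact hkept
  · refine ⟨?_, ?_, ?_, ?_⟩
    · rw [eslot]
      apply hl.ge.of_eq ecfg
      intro i' hi'
      simp only [Floor1.values, voff]
      apply (hkept i' hi').i32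
      · simp only []
        omega
      · simp only [voff]
        omega
    · rw [eslot]
      exact hl.lo
    · rw [eslot]
      exact hl.hi
    · rw [eslot]
      exact hl.two
  · have e : slot g mem' 0x18 = slot g mem 0x18 := by
      simp only [slot]
      exact EA.u32 _ (by omega) (by omega) (by omega)
    rw [e]
    exact hcnt

/-- **THE FRAME LEMMA OF THE FLOOR LOOP (with `floor_types[i]` writable: F2)**: the whole loop assertion at the state `s` reached from
the cut point `v` by a piece of code that wrote only `WinT` windows, left the shadow alone, kept `rsp` and `rbp`, and ends with `Bits`
(the reader's post, or `Bits.frame_fields` / `Reader.store_off_obj`). -/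
theorem carry_t (h : FloorLoop u₀ g pc i A5 A v) (hlt : (i : Int) < stb_vorbis.floor_count v.mem g.f) (hhi : hi ≤ 1596)
    (hrip : s.rip = pc') (hrsp : s.reg .rsp = addr g.R) (hrbp : s.reg .rbp = addr g.f) (hinv : abiInv s)
    (hcode : CodeOK u₀ s.mem) (hs : Mem.SameExcept ws v.mem s.mem)
    (hw : ∀ w, w ∈ ws → WinT g i (floorAt g v.mem i) lo hi w) (hun : ShadowUntouched v.mem s.mem)
    (hbits : Bits (g.Blk A) g.len s.mem g.f) : FloorLoop u₀ g pc' i A5 A s := by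
  have hgeo := geo h hlt
  have hframe := frame_carry h.frame hgeo hrip hrsp hinv hcode hs hw hhi hun
  have hmid := mid_carry hgeo h.mid h.floors hs hw hhi hun hbits
  obtain ⟨hfloors, hlfl, hcnt⟩ := floors_carry hgeo h.floors h.lfl h.cnt hs hw hhi
  obtain ⟨ecount, _, _, _, _⟩ := hdr_same hgeo hs hw hhi
  exact ⟨hframe, h.hand, hmid, hrbp, hcnt, by rw [ecount]; exact h.i_le, hfloors, hlfl⟩

/-- **THE FRAME LEMMA OF THE FLOOR LOOP**: `carry_t` for `Win` windows (every piece but F2's store of `floor_types[i]`). -/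
theorem carry (h : FloorLoop u₀ g pc i A5 A v) (hlt : (i : Int) < stb_vorbis.floor_count v.mem g.f) (hhi : hi ≤ 1596)
    (hrip : s.rip = pc') (hrsp : s.reg .rsp = addr g.R) (hrbp : s.reg .rbp = addr g.f) (hinv : abiInv s)
    (hcode : CodeOK u₀ s.mem) (hs : Mem.SameExcept ws v.mem s.mem)
    (hw : ∀ w, w ∈ ws → Win g (floorAt g v.mem i) lo hi w) (hun : ShadowUntouched v.mem s.mem)
    (hbits : Bits (g.Blk A) g.len s.mem g.f) : FloorLoop u₀ g pc' i A5 A s :=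
  carry_t h hlt hhi hrip hrsp hrbp hinv hcode hs (fun w hw' => (hw w hw').winT) hun hbits

/-- **The loop assertion at a state with the SAME memory** (a piece without a store: a reload from the stack, a compare and a jump,
a check routine's fast path): only the program counter and the registers are new. -/
theorem same_mem (h : FloorLoop u₀ g pc i A5 A v) (hmem : s.mem = v.mem) (hrip : s.rip = pc') (hrsp : s.reg .rsp = addr g.R)
    (hrbp : s.reg .rbp = addr g.f) (hinv : abiInv s) : FloorLoop u₀ g pc' i A5 A s := by
  have hf := h.frame
  have hframe : Frame u₀ g pc' A s :=
    { entry := hf.entry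
      rip := hrip
      rsp := hrsp
      shadowIdx := by rw [hmem]; exact hf.shadowIdx
      saved_rbx := by rw [hmem]; exact hf.saved_rbx
      saved_rbp := by rw [hmem]; exact hf.saved_rbp
      saved_r12 := by rw [hmem]; exact hf.saved_r12
      saved_r13 := by rw [hmem]; exact hf.saved_r13
      saved_r14 := by rw [hmem]; exact hf.saved_r14
      saved_r15 := by rw [hmem]; exact hf.saved_r15
      saved_ra := by rw [hmem]; exact hf.saved_ra
      code := by rw [hmem]; exact hf.code
      inv := hinv
      shadow := by rw [hmem]; exact hf.shadow
      offText := hf.offText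
      ext := hf.ext
      callers := hf.callers
      sh7 := by rw [hmem]; exact hf.sh7
      same := by rw [hmem]; exact hf.same }
  refine ⟨hframe, h.hand, ?_, hrbp, ?_, ?_, ?_, ?_⟩
  · rw [hmem]
    exact h.mid
  · rw [hmem]
    exact h.cnt
  · rw [hmem]
    exact h.i_le
  · rw [hmem]
    exact h.floors
  · rw [hmem]
    exact h.lfl

/-- **What the floor clauses read of `*f` is the same in the new memory**: `floorAt` (the element does not move), `floor_count`,
`codebook_count`, `floor_types[i]`. -/
theorem fields_same (geo : Geo g A mem i) (hs : Mem.SameExcept ws mem mem')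
    (hw : ∀ w, w ∈ ws → Win g (floorAt g mem i) lo hi w) (hhi : hi ≤ 1596) :
    floorAt g mem' i = floorAt g mem i ∧ stb_vorbis.floor_count mem' g.f = stb_vorbis.floor_count mem g.f ∧
    stb_vorbis.codebook_count mem' g.f = stb_vorbis.codebook_count mem g.f ∧
    stb_vorbis.floor_types mem' g.f i = stb_vorbis.floor_types mem g.f i := by
  obtain ⟨ecount, _, ecc, _, eG⟩ := hdr_same geo hs (fun w hw' => (hw w hw').winT (i := i)) hhi
  exact ⟨eG, ecount, ecc, types_same geo hs hw hhi⟩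

/-- **The geometry in the new memory** (the header fields are the same). -/
theorem Geo.step (geo : Geo g A mem i) (hs : Mem.SameExcept ws mem mem')
    (hw : ∀ w, w ∈ ws → WinT g i (floorAt g mem i) lo hi w) (hhi : hi ≤ 1596) : Geo g A mem' i := by
  obtain ⟨ecount, ecfg, _, _, eG⟩ := hdr_same geo hs hw hhi
  obtain ⟨r8, rlo, rhi, ra, flo, fhi, fstack, farena, flog, fc1, fc64, ilt, gdef, blo, bhi, btext, bstack, bdata, blog⟩ := geo
  refine ⟨r8, rlo, rhi, ra, flo, fhi, fstack, farena, flog, ?_, ?_, ?_, ?_, ?_, ?_, btext, ?_, ?_, ?_⟩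
  · rw [ecount]
    exact fc1
  · rw [ecount]
    exact fc64
  · rw [ecount]
    exact ilt
  · rw [eG, ecfg]
    exact gdef
  · rw [ecfg]
    exact blo
  · rw [ecount, ecfg]
    exact bhi
  · rw [ecount, ecfg]
    exact bstack
  · rw [ecount, ecfg]
    exact bdata
  · rw [ecount, ecfg]
    exact blog

/-! ### Pieces that do not call a reader: `Bits` comes from the windows -/

/-- **A window of a piece that calls no reader** (its own stores, the check routines, `error`): the stack below `[R + 8]`, the own
frame `[R+30H, R+598H)`, `error`'s word `[f+136, f+144)`, the element's part `[G + lo, G + hi)`. None meets a field `Bits` reads. -/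
def Quiet (g : Ghost) (G lo hi : Nat) (w : Span) : Prop :=
  (g.RA - 1888 ≤ w.lo ∧ w.hi ≤ g.R + 8) ∨ (g.R + 0x30 ≤ w.lo ∧ w.hi ≤ g.R + 0x598) ∨
  (g.f + 136 ≤ w.lo ∧ w.hi ≤ g.f + 144) ∨ (G + lo ≤ w.lo ∧ w.hi ≤ G + hi)

/-- A quiet window is an allowed window. -/
theorem Quiet.win {w : Span} (h : Quiet g G lo hi w) : Win g G lo hi w := by
  unfold Quiet at h
  unfold Win
  omega

/-- **`Bits` over quiet windows**: the four ranges of `*f` that `Bits` reads are the same (`Bits.frame_fields`). -/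
theorem bits_quiet {Blk : Block → Prop} {len : Nat} (geo : Geo g A mem i) (hb : Bits Blk len mem g.f)
    (hs : Mem.SameExcept ws mem mem') (hw : ∀ w, w ∈ ws → Quiet g (floorAt g mem i) lo hi w) (hhi : hi ≤ 1596) :
    Bits Blk len mem' g.f := by
  obtain ⟨r8, rlo, rhi, ra, flo, fhi, fstack, farena, flog, fc1, fc64, ilt, gdef, blo, bhi, btext, bstack, bdata, blog⟩ := geo
  apply hb.frame_fields
  apply Bits.SameFields.of_sameExcept hs
  · intro w hw'
    have hc := hw w hw'
    unfold Quiet at hc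
    omega
  · intro w hw'
    have hc := hw w hw'
    unfold Quiet at hc
    omega
  · intro w hw'
    have hc := hw w hw'
    unfold Quiet at hc
    omega
  · intro w hw'
    have hc := hw w hw'
    unfold Quiet at hc
    omega

/-- **THE FRAME LEMMA OF THE FLOOR LOOP for a piece that calls no reader** (stores into the element and the spill slots, check
routines, `error`): `carry` with `Bits` from the windows. -/
theorem carry_quiet (h : FloorLoop u₀ g pc i A5 A v) (hlt : (i : Int) < stb_vorbis.floor_count v.mem g.f) (hhi : hi ≤ 1596)
    (hrip : s.rip = pc') (hrsp : s.reg .rsp = addr g.R) (hrbp : s.reg .rbp = addr g.f) (hinv : abiInv s)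
    (hcode : CodeOK u₀ s.mem) (hs : Mem.SameExcept ws v.mem s.mem)
    (hw : ∀ w, w ∈ ws → Quiet g (floorAt g v.mem i) lo hi w) (hun : ShadowUntouched v.mem s.mem) :
    FloorLoop u₀ g pc' i A5 A s :=
  carry h hlt hhi hrip hrsp hrbp hinv hcode hs (fun w hw' => (hw w hw').win) hun
    (bits_quiet (geo h hlt) h.mid.bits hs hw hhi)

/-- **THE FRAME LEMMA OF THE FLOOR LOOP WITHOUT `i < floor_count`, for stack-only windows** (a pushed return address, a callee's
frame: the exit of F2 to R1, where `i = floor_count` and the memory differs from the cut point's by the return address of a check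
call): nothing the assertion reads lies in `[RA − 1888, R + 8)`. Only `i_le` is used; `Bits` by `Bits.frame_fields`. -/
theorem carry_done (h : FloorLoop u₀ g pc i A5 A v) (hrip : s.rip = pc') (hrsp : s.reg .rsp = addr g.R)
    (hrbp : s.reg .rbp = addr g.f) (hinv : abiInv s) (hcode : CodeOK u₀ s.mem) (hs : Mem.SameExcept ws v.mem s.mem)
    (hw : ∀ w, w ∈ ws → g.RA - 1888 ≤ w.lo ∧ w.hi ≤ g.R + 8) (hun : ShadowUntouched v.mem s.mem) :
    FloorLoop u₀ g pc' i A5 A s := by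
  have hfc1 := h.floors.FL1.1
  have hile := h.i_le
  have hgeo : Geo g A v.mem 0 := geo_at h (by omega)
  have hq : ∀ w, w ∈ ws → Quiet g (floorAt g v.mem 0) 1596 1596 w := fun w hw' => Or.inl (hw w hw')
  have hwin : ∀ w, w ∈ ws → Win g (floorAt g v.mem 0) 1596 1596 w := fun w hw' => (hq w hw').win
  have hwt : ∀ w, w ∈ ws → WinT g 0 (floorAt g v.mem 0) 1596 1596 w := fun w hw' => (hwin w hw').winT
  have hbits := bits_quiet hgeo h.mid.bits hs hq (Nat.le_refl _)
  have hframe := frame_carry h.frame hgeo hrip hrsp hinv hcode hs hwt (Nat.le_refl _) hun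
  have hfl0 : FloorsUpTo (Since A5 A.1) v.mem g.f 0 :=
    ⟨h.floors.toFloorShape, fun _ hi => absurd hi (Nat.not_lt_zero _), fun _ hi => absurd hi (Nat.not_lt_zero _)⟩
  have hmid := mid_carry hgeo h.mid hfl0 hs hwt (Nat.le_refl _) hun hbits
  obtain ⟨ecount, ecfg, ecc, eft, _⟩ := hdr_same hgeo hs hwt (Nat.le_refl _)
  have eft0 := types_same hgeo hs hwin (Nat.le_refl _)
  obtain ⟨r8, rlo, rhi, ra, flo, fhi, fstack, farena, flog, fc1, fc64, ilt, gdef, blo, bhi, btext, bstack, bdata, blog⟩ := hgeo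
  -- the finished floor elements are kept (they lie inside the floor block, off the stack)
  have hkept : ∀ i' : Nat, i' < i →
      (Block.mk (stb_vorbis.floor_config_at v.mem g.f i') Off.sizeof.Floor).Kept v.mem s.mem := by
    intro i' hi'
    apply Block.Kept.of_sameExcept hs
    · intro w hw'
      have hc := hw w hw'
      simp only [stb_vorbis.floor_config_at, voff]
      omega
    · simp only [stb_vorbis.floor_config_at, voff]
      omega
  have EA : Mem.EqOn (g.R + 8) (g.R + 0x30) v.mem s.mem := by
    apply eqOn_off hs hw
    intro w hc
    omega
  have eslot : s.mem.i32 (g.R + 0x28) = v.mem.i32 (g.R + 0x28) := EA.i32 _ (by omega) (by omega) (by omega)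
  have hl := h.lfl
  refine ⟨hframe, h.hand, hmid, hrbp, ?_, by rw [ecount]; exact hile, ?_, ?_⟩
  · have e : slot g s.mem 0x18 = slot g v.mem 0x18 := by
      simp only [slot]
      exact EA.u32 _ (by omega) (by omega) (by omega)
    rw [e]
    exact h.cnt
  · apply h.floors.frame ecount ecfg ecc
    · intro i' hi'
      by_cases h0 : i' = 0
      · rw [h0]
        exact eft0
      · exact eft i' (by omega) h0
    · exact hkept
  · refine ⟨?_, ?_, ?_, ?_⟩
    · rw [eslot]
      apply hl.ge.of_eq ecfg
      intro i' hi'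
      simp only [Floor1.values, voff]
      apply (hkept i' hi').i32
      · simp only []
        omega
      · simp only [voff]
        omega
    · rw [eslot]
      exact hl.lo
    · rw [eslot]
      exact hl.hi
    · rw [eslot]
      exact hl.two

/-! ### The element under construction -/

/-- **`Floor4` (FL3(i), FL4(i), FL5(i)) over the stores of a piece** whose part of the element starts at or above the class tables
(`[G + 21H, …)`): `partitions` and `partition_class_list[]` read the same. -/
theorem floor4_carry {mc : Int} (geo : Geo g A mem i) (hc : Floor4 g mem i mc) (hlo : 0x21 ≤ lo) (hlh : lo ≤ hi) (hhi : hi ≤ 1596)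
    (hs : Mem.SameExcept ws mem mem') (hw : ∀ w, w ∈ ws → Win g (floorAt g mem i) lo hi w) : Floor4 g mem' i mc := by
  obtain ⟨eG, ecount, _, eft⟩ := fields_same geo hs hw hhi
  have EG := elem_below geo hs (fun w hw' => (hw w hw').winT (i := i)) hlh hhi
  obtain ⟨r8, rlo, rhi, ra, flo, fhi, fstack, farena, flog, fc1, fc64, ilt, gdef, blo, bhi, btext, bstack, bdata, blog⟩ := geo
  have ep : Floor1.partitions mem' (floorAt g mem i) = Floor1.partitions mem (floorAt g mem i) := by
    simp only [vacc, voff]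
    exact EG.u8 _ (by omega) (by omega) (by omega)
  refine ⟨?_, ?_, ?_, hc.mc_lo, hc.mc_hi, ?_⟩
  · rw [ecount]
    exact hc.lt
  · rw [eft]
    exact hc.FL3
  · rw [eG, ep]
    exact hc.FL4
  · rw [eG, ep]
    apply hc.pcl.of_eq
    intro j hj
    have h4 := hc.FL4
    simp only [vacc, voff]
    exact EG.u8 _ (by omega) (by omega) (by omega)

/-- **The class tables of the classes below `n ≤ 16` read the same** when the part of the element that was written starts at or
above `Xlist` (`[G + 152H, …)`). (For `n > 16` the accessors `class_dimensions[c]` … alias later fields of the element: the reason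
why the children of F5 cut the class counter down to 16.) -/
theorem classes_carry {cbc : Int} {n : Nat} (geo : Geo g A mem i) (hc : ClassesUpTo mem (floorAt g mem i) cbc n) (hn : n ≤ 16)
    (hlo : 0x152 ≤ lo) (hlh : lo ≤ hi) (hhi : hi ≤ 1596)
    (hs : Mem.SameExcept ws mem mem') (hw : ∀ w, w ∈ ws → WinT g i (floorAt g mem i) lo hi w) :
    ClassesUpTo mem' (floorAt g mem i) cbc n := by
  have EG := elem_below geo hs hw hlh hhi
  obtain ⟨r8, rlo, rhi, ra, flo, fhi, fstack, farena, flog, fc1, fc64, ilt, gdef, blo, bhi, btext, bstack, bdata, blog⟩ := geo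
  apply hc.of_eq
  · intro c hc'
    simp only [vacc, voff]
    exact EG.u8 _ (by omega) (by omega) (by omega)
  · intro c hc'
    simp only [vacc, voff]
    exact EG.u8 _ (by omega) (by omega) (by omega)
  · intro c hc'
    simp only [vacc, voff]
    exact EG.u8 _ (by omega) (by omega) (by omega)
  · intro c k hc' hk'
    simp only [vacc, voff]
    exact EG.i16 _ (by omega) (by omega) (by omega)

/-- **The class tables of the classes below `n` read the same when the written part of the element lies inside ROW `n` or later
rows of ONE of the four tables** (the stores of segment F4: `class_dimensions[n]` at `21H + n`, `class_subclasses[n]` at `31H + n`,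
`class_masterbooks[n]` at `41H + n`, `subclass_books[n][k]` at `52H + 16n + 2k`): `ClassesUpTo … n` is kept. -/
theorem classes_row {cbc : Int} {n : Nat} (geo : Geo g A mem i) (hc : ClassesUpTo mem (floorAt g mem i) cbc n) (hn : n ≤ 16)
    (hrow : (0x21 + n ≤ lo ∧ hi ≤ 0x31) ∨ (0x31 + n ≤ lo ∧ hi ≤ 0x41) ∨ (0x41 + n ≤ lo ∧ hi ≤ 0x52) ∨ 0x52 + 16 * n ≤ lo)
    (hlh : lo ≤ hi) (hhi : hi ≤ 1596)
    (hs : Mem.SameExcept ws mem mem') (hw : ∀ w, w ∈ ws → WinT g i (floorAt g mem i) lo hi w) :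
    ClassesUpTo mem' (floorAt g mem i) cbc n := by
  have EG := elem_below geo hs hw hlh hhi
  have EH := elem_above geo hs hw hlh hhi
  obtain ⟨r8, rlo, rhi, ra, flo, fhi, fstack, farena, flog, fc1, fc64, ilt, gdef, blo, bhi, btext, bstack, bdata, blog⟩ := geo
  apply hc.of_eq
  · intro c hc'
    simp only [vacc, voff]
    rcases hrow with h | h | h | h
    · exact EG.u8 _ (by omega) (by omega) (by omega)
    · exact EG.u8 _ (by omega) (by omega) (by omega)
    · exact EG.u8 _ (by omega) (by omega) (by omega)
    · exact EG.u8 _ (by omega) (by omega) (by omega)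
  · intro c hc'
    simp only [vacc, voff]
    rcases hrow with h | h | h | h
    · exact EH.u8 _ (by omega) (by omega) (by omega)
    · exact EG.u8 _ (by omega) (by omega) (by omega)
    · exact EG.u8 _ (by omega) (by omega) (by omega)
    · exact EG.u8 _ (by omega) (by omega) (by omega)
  · intro c hc'
    simp only [vacc, voff]
    rcases hrow with h | h | h | h
    · exact EH.u8 _ (by omega) (by omega) (by omega)
    · exact EH.u8 _ (by omega) (by omega) (by omega)
    · exact EG.u8 _ (by omega) (by omega) (by omega)
    · exact EG.u8 _ (by omega) (by omega) (by omega)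
  · intro c k hc' hk'
    simp only [vacc, voff]
    rcases hrow with h | h | h | h
    · exact EH.i16 _ (by omega) (by omega) (by omega)
    · exact EH.i16 _ (by omega) (by omega) (by omega)
    · exact EH.i16 _ (by omega) (by omega) (by omega)
    · exact EG.i16 _ (by omega) (by omega) (by omega)

/-- **`Floor5` (FL3(i) – FL6(i)) over the stores of a piece** whose part of the element starts at or above `Xlist`
(`[G + 152H, …)`), for a class counter `n ≤ 16`. -/
theorem floor5_carry {mc : Int} {n : Nat} (geo : Geo g A mem i) (hc : Floor5 g mem i mc n) (hn : n ≤ 16) (hlo : 0x152 ≤ lo)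
    (hlh : lo ≤ hi) (hhi : hi ≤ 1596)
    (hs : Mem.SameExcept ws mem mem') (hw : ∀ w, w ∈ ws → Win g (floorAt g mem i) lo hi w) : Floor5 g mem' i mc n := by
  obtain ⟨eG, _, ecc, _⟩ := fields_same geo hs hw hhi
  refine ⟨floor4_carry geo hc.base (by omega) hlh hhi hs hw, ?_, hc.mc_lt⟩
  rw [eG, ecc]
  exact classes_carry geo hc.classes hn hlo hlh hhi hs (fun w hw' => (hw w hw').winT)

/-- **The entry assertion's class counter cut down to 16** (`AtF5` / `AtF6` / `AtF7` quantify it existentially; `max_class ≤ 15 < 16`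
keeps `mc < n`): what makes `floor5_carry` applicable. -/
theorem Floor5.min16 {mc : Int} {n : Nat} (h : Floor5 g mem i mc n) : Floor5 g mem i mc (min n 16) := by
  refine ⟨h.base, ?_, ?_⟩
  · intro c hc
    exact h.classes c (by omega)
  · have h1 := h.mc_lt
    have h2 := h.base.mc_hi
    omega

/-- **`Floor6` (FL3(i) – FL8(i), XL) over the stores of a piece** whose part of the element lies inside `sorted_order` / `neighbors`
(`[G + 346H, G + 634H)`: segments F6, F7), for a class counter `n ≤ 16`. -/
theorem floor6_carry {mc : Int} {n : Nat} (geo : Geo g A mem i) (hc : Floor6 g mem i mc n) (hn : n ≤ 16) (hlo : 0x346 ≤ lo)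
    (hlh : lo ≤ hi) (hhi : hi ≤ 0x634)
    (hs : Mem.SameExcept ws mem mem') (hw : ∀ w, w ∈ ws → Win g (floorAt g mem i) lo hi w) : Floor6 g mem' i mc n := by
  obtain ⟨eG, _, _, _⟩ := fields_same geo hs hw (by omega)
  have h5 := floor5_carry geo hc.base hn (by omega) hlh (by omega) hs hw
  have EG := elem_below geo hs (fun w hw' => (hw w hw').winT (i := i)) hlh (by omega)
  have EH := elem_above geo hs (fun w hw' => (hw w hw').winT (i := i)) hlh (by omega)
  have h4 := hc.base.base.FL4
  have hpcl := hc.base.base.pcl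
  obtain ⟨r8, rlo, rhi, ra, flo, fhi, fstack, farena, flog, fc1, fc64, ilt, gdef, blo, bhi, btext, bstack, bdata, blog⟩ := geo
  have ep : Floor1.partitions mem' (floorAt g mem i) = Floor1.partitions mem (floorAt g mem i) := by
    simp only [vacc, voff]
    exact EG.u8 _ (by omega) (by omega) (by omega)
  have emul : Floor1.floor1_multiplier mem' (floorAt g mem i) = Floor1.floor1_multiplier mem (floorAt g mem i) := by
    simp only [vacc, voff]
    exact EH.u8 _ (by omega) (by omega) (by omega)
  have erb : Floor1.rangebits mem' (floorAt g mem i) = Floor1.rangebits mem (floorAt g mem i) := by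
    simp only [vacc, voff]
    exact EH.u8 _ (by omega) (by omega) (by omega)
  have eval : Floor1.values mem' (floorAt g mem i) = Floor1.values mem (floorAt g mem i) := by
    simp only [vacc, voff]
    exact EH.i32 _ (by omega) (by omega) (by omega)
  have esum : Floor1.dimSum mem' (floorAt g mem i) (Floor1.partitions mem (floorAt g mem i)) =
      Floor1.dimSum mem (floorAt g mem i) (Floor1.partitions mem (floorAt g mem i)) := by
    apply Floor1.dimSum_congr
    · intro j hj
      simp only [vacc, voff]
      exact EG.u8 _ (by omega) (by omega) (by omega)
    · intro j hj
      have hcl := (hpcl j hj).1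
      simp only [vacc, voff] at hcl ⊢
      exact EG.u8 _ (by omega) (by omega) (by omega)
  refine ⟨h5, ?_, ?_, ?_⟩
  · rw [eG, emul]
    exact hc.FL7
  · rw [eG, eval, ep, esum]
    exact hc.FL8
  · rw [eG]
    have hxl : XLUpTo mem (floorAt g mem i) (Floor1.values mem (floorAt g mem i)).toNat := hc.xl
    have h8 := hc.FL8
    show XLUpTo mem' (floorAt g mem i) (Floor1.values mem' (floorAt g mem i)).toNat
    rw [eval]
    apply hxl.of_eq (by omega) erb
    intro j hj
    have hsum : Floor1.dimSum mem (floorAt g mem i) (Floor1.partitions mem (floorAt g mem i))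
        ≤ 8 * Floor1.partitions mem (floorAt g mem i) := by
      apply sumTo_le_mul
      intro j' hj'
      have hp := hpcl j' hj'
      have hlt := hc.base.mc_lt
      exact (hc.base.classes _ (by omega)).dim.2
    simp only [vacc, voff]
    exact EG.u16 _ (by omega) (by omega) (by omega)

/-- **Every check site of the element**: `k` bytes at offset `off` of `g(i)` lie inside ONE live block (the floor block of FL2).
Memory-independent: stated once, at the state the piece starts from. -/
theorem site (h : FloorLoop u₀ g pc i A5 A v) (hlt : (i : Int) < stb_vorbis.floor_count v.mem g.f) (off k : Nat) (hk : 1 ≤ k)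
    (ho : off + k ≤ Off.sizeof.Floor) : Site (Live (stackObjs g.frames' ++ A.2)) (floorAt g v.mem i + off) k := by
  have hshape : FloorShape (g.Blk A) v.mem g.f :=
    h.floors.toFloorShape.reblk (fun hB => runBlk_setup hB.blk)
  exact hshape.site_elem h.mid.env.live (IsFloor.of_lt hlt) off k ho hk rfl

/-! ### The callees' preconditions -/

/-- **`ReaderEnv`** (the memory-independent part of every reader's precondition) from `hand` and the point's environment.
(`readerEnv_mid` of Vorbis/Spec/StartDecoderBTest.lean, importable without the Test file.) -/
theorem reader_env {k kc z : Nat} {Ac : Arena} (hh : g.Hand A) (hm : Mid g k kc z Ac A mem) :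
    ReaderEnv A.2 g.frames' (g.Blk A) g.len g.f :=
  ⟨hm.env.live, hh.obj.mono (P2.callers_live g A.2), fun hl => (hh.inp hl).mono (P2.callers_live g A.2)⟩

/-- **The shadow clause of a callee's precondition** at the state `s` right after a `call` from a cut point (`rsp = R − 8`; the
pushed return address is no shadow byte). (`shadowPre_call` of the Test file.) -/
theorem shadow_pre (hf : Frame u₀ g pc A v) (hrsp : (s.reg .rsp).toNat + 8 = g.R) (hun : ShadowUntouched v.mem s.mem) :
    ShadowPre A.2 g.frames' s := by
  refine ⟨?_, hf.offText⟩
  rw [hrsp]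
  exact hf.shadow.untouched hun

/-- **`ReaderPre` of `get_bits(f, n)`** at the state `s` right after the `call` (the goal `pre_<addr>` is `⟨Floor.reader_pre …, by
rw [bitsArg_def, w_rsi]; decide⟩`): `rdi = f`, `rsp = R − 8`, no shadow store since the cut point, and `Bits` of the memory with the
pushed return address (`Floor.bits_push`). -/
theorem reader_pre (h : FloorLoop u₀ g pc i A5 A v) (hrsp : (s.reg .rsp).toNat + 8 = g.R) (hun : ShadowUntouched v.mem s.mem)
    (hrdi : (s.reg .rdi).toNat = g.f) (hbits : Bits (g.Blk A) g.len s.mem g.f) : ReaderPre A.2 g.frames' (g.Blk A) g.len s := by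
  refine ⟨shadow_pre h.frame hrsp hun, ?_, ?_⟩
  · rw [hrdi]
    exact reader_env h.hand h.mid
  · rw [hrdi]
    exact hbits

/-- **`error.spec`'s precondition** at the state `s` right after the `call`. -/
theorem error_pre (h : FloorLoop u₀ g pc i A5 A v) (hrsp : (s.reg .rsp).toNat + 8 = g.R) (hun : ShadowUntouched v.mem s.mem)
    (hrdi : (s.reg .rdi).toNat = g.f) : (error.spec A.2 g.frames').pre s := by
  refine ⟨shadow_pre h.frame hrsp hun, ?_⟩
  rw [hrdi]
  exact h.hand.obj.mono (P2.callers_live g A.2)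

/-- **`Bits` after the push of a return address** (the `call`'s own store at `[R − 8]`, or any store below the steady stack
pointer): the store misses `*f`. -/
theorem bits_push (h : FloorLoop u₀ g pc i A5 A v) (w : Word) (k x : Nat) (hw : w.toNat + k ≤ g.R + 8)
    (hlo : 0x700000 ≤ w.toNat) : Bits (g.Blk A) g.len (v.mem.writeLE w k x) g.f := by
  have hwh := obj_where h.frame h.hand
  obtain ⟨hr1, _⟩ := h.frame.r_eq
  obtain ⟨_, ha2, ha3⟩ := h.frame.ra
  simp only [steady, depth] at hr1 ha2
  refine (Reader.store_off_obj h.mid.bits w k x (by omega) ?_).1.bits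
  omega

/-! ### For the walk: slots and signed counters -/

/-- **The steady stack pointer and the slots above it in the walker's normal form**: `addr (R + k) = e.rsp − d` for `k + d = 1480`
(the walker wants `rsp` as `g.e.reg .rsp - 1480` and a slot `[rsp + k]` as `g.e.reg .rsp - (1480 − k)`). -/
theorem rsp_slot (hf : Frame u₀ g pc A v) (k d : Nat) (hk : k + d = 1480) :
    addr (g.R + k) = g.e.reg .rsp - UInt64.ofNat d := by
  have h1 : 0x700000 + depth ≤ (g.e.reg .rsp).toNat := hf.entry.room
  have h2 : (g.e.reg .rsp).toNat + 8 ≤ 0x800000 := hf.entry.top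
  simp only [depth] at h1
  apply UInt64.toNat_inj.mp
  have hR : g.R + k = (g.e.reg .rsp).toNat - d := by
    unfold Ghost.R Ghost.RA steady
    omega
  rw [toNat_addr (g.R + k) (by omega), hR]
  have e2 : (UInt64.ofNat d).toNat = d := by
    rw [UInt64.toNat_ofNat']
    exact Nat.mod_eq_of_lt (by omega)
  rw [UInt64.toNat_sub_of_le]
  · rw [e2]
  · rw [UInt64.le_iff_toNat_le, e2]
    omega

/-- **The signed 32-bit view of `word32 m` is `m`** (a value in the `int` range): how `r13d = max_class` (possibly −1) enters a
signed compare (`cmp r12d,r13d ; jg`). -/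
theorem s32_word32 (m : Int) (h1 : -2147483648 ≤ m) (h2 : m < 2147483648) : (Word.part .w32 (word32 m)).toInt = m := by
  have e := s32_eq_argInt (word32 m)
  unfold s32 argInt at e
  rw [e]
  unfold word32
  rw [toNat_addr _ (by omega)]
  rcases sint32_cases ((m % 4294967296).toNat % 2 ^ 32) with ⟨c1, c2⟩ | ⟨c1, c2⟩
  · rw [c2]
    omega
  · rw [c2]
    omega

/-- **The signed 32-bit view of `addr n` for a small `n`** (`cnt32_part_toInt` in the spelling of the assertions' register facts). -/
theorem s32_addr (n : Nat) (h : n < 2147483648) : (Word.part .w32 (addr n)).toInt = n :=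
  cnt32_part_toInt n h

/-! ### The error exit -/

/-- **An error exit of the floor section** (`error(f, VORBIS_invalid_setup)` returned 0, then `jmp 113b22`): the loop assertion at the
epilogue's address with eax = 0 is `AtERR` — SD.ERR by `Mid.failed`; H2 / H3 / H5 from the zero rest (the residue and mapping
sections have not started). From the worker of `start_decoder.F2` (`atERR_of_loop`). -/
theorem atERR (h : FloorLoop u₀ g pc_ERR i A5 A s) (hrax : (s.reg .rax).toNat % 2 ^ 32 = 0) : AtERR u₀ g s :=
  ⟨A, h.frame, h.hand, Or.inl ⟨hrax,
    h.mid.failed (by omega) (h.mid.h2_null (by omega) _) (h.mid.h3_null (by omega) _) (h.mid.h5_null (by omega) _)⟩⟩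

end Floor
end Vorbis.Spec.StartDecoder
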